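-- pv_equiv track=rewrite | github.com/mahdi-ebrahimi-per/codewars | The Hashtag Generator/The Hashtag Generator.py | generate_hashtag
-- ===== SOURCE A (Python) =====
-- def generate_hashtag(s):
--
--     # not empty and len not bigger that 140
--     if len(s) > 140 or len(s)==0:
--         return False
--
--
--     # split and stanradize : "code    wars" → ["code", "wars"]
--     s = s.split(" ")
--     space_count = s.count("")
--     for i in range(space_count):
--         s.remove('')
--
--
--     # insert # in first
--     s.insert(0, '#')
--
--
--     # first letter of each capitalized
--     index = 0
--     for i in s:
--         s[index] = i.capitalize()
--         index += 1
--
--     result = "".join(s)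
--
--     return result
-- ===== SOURCE B (Python) =====
-- def generate_hashtag(s):
--     if len(s) > 140 or len(s) == 0:
--         return False
--     out = ['#']
--     at_word_start = True
--     for c in s:
--         if c == ' ':
--             at_word_start = True
--         else:
--             out.append(c.upper() if at_word_start else c.lower())
--             at_word_start = False
--     return ''.join(out)
-- ===== Notes on version B (the rewrite author's own statement) =====
-- stated objective: alternative
-- what changed: Replaces A's split-on-space / count-and-remove-empties / insert-hash / capitalize-each / join pipeline by one left-to-right character scan with a word-start flag that emits upper/lowercased characters directly, skipping spaces; Pre_ excludes empty or over-140-char strings, where both return the bool False instead of a string.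
-- outside the precondition, e.g. on generate_hashtag(''): A returns False, B returns False
import Mathlib
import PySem

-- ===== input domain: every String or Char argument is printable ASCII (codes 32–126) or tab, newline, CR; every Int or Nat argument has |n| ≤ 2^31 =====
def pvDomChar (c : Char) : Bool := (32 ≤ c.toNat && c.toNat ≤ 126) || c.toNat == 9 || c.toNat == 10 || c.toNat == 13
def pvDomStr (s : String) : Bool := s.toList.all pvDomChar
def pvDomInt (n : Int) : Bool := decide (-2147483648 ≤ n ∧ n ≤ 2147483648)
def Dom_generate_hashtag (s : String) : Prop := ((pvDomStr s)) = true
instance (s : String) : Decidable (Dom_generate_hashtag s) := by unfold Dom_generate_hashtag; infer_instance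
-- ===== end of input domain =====

-- B replaces A's split/remove/capitalize/join pipeline by a single left-to-right scan
-- with a word-start flag (objective: alternative decomposition, same cost; Python returns
-- False on the length guard, ported as none).

-- ===== PORT A =====
-- str.capitalize(): first char uppercased, the rest lowercased (exact on the ASCII domain)
def pyCapitalize (cs : List Char) : List Char :=
  match cs with
  | [] => []
  | c :: rest => PySem.Chars.upperChar c :: PySem.Chars.lower rest

-- "for i in range(space_count): s.remove('')" — range(n) only counts iterations, so the
-- loop is recursion on n; remove('') raising ValueError is unreachable (count guarantees
-- membership), ported as the identity default.
def removeEmptyLoop : Nat → List (List Char) → List (List Char)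
  | 0, l => l
  | n + 1, l => removeEmptyLoop n ((PySem.List.remove? l ([] : List Char)).getD l)

def generate_hashtag (s : String) : Option String :=
  if 140 < PySem.Str.len s ∨ PySem.Str.len s = 0 then none
  else
    let parts := PySem.Chars.splitOn s.toList [' ']
    let spaceCount := PySem.List.count parts ([] : List Char)
    let parts := removeEmptyLoop spaceCount parts
    let parts := PySem.List.insert parts 0 ['#']
    -- "for i in s: s[index] = i.capitalize(); index += 1" — an in-place map over the list
    let parts := parts.map pyCapitalize
    some (String.ofList (PySem.Chars.join [] parts))

-- ===== PORT B =====
def scanWords : List Char → Bool → List Char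
  | [], _ => []
  | c :: rest, atStart =>
    if c = ' ' then scanWords rest true
    else (if atStart then PySem.Chars.upperChar c else PySem.Chars.lowerChar c)
           :: scanWords rest false

def generate_hashtag_alt (s : String) : Option String :=
  if 140 < PySem.Str.len s ∨ PySem.Str.len s = 0 then none
  else some (String.ofList ('#' :: scanWords s.toList true))

-- ===== PRECONDITION & SPEC =====
-- Pre_ excludes the empty string and strings longer than 140 characters: there Python A
-- (and B) return the bool False, which is not a value of the declared type Optional[str].
def Pre_generate_hashtag (s : String) : Prop :=
  1 ≤ PySem.Str.len s ∧ PySem.Str.len s ≤ 140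
instance (s : String) : Decidable (Pre_generate_hashtag s) := by unfold Pre_generate_hashtag; infer_instance
def pvWitness_generate_hashtag : String := "code wars"

def Spec_generate_hashtag (s : String) (out : Option String) : Prop := out = generate_hashtag_alt s
instance (s : String) (out : Option String) : Decidable (Spec_generate_hashtag s out) := by unfold Spec_generate_hashtag; infer_instance

-- ===== CLAIM (what is proved, stated in full; the proofs are below) =====
def Claim_equal_generate_hashtag : Prop := ∀ (s : String), Dom_generate_hashtag s → Pre_generate_hashtag s → Spec_generate_hashtag s (generate_hashtag s)

-- ===== LEMMAS AND PROOFS =====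

-- the pieces produced by splitting the remaining input cs, with cur the reversed
-- characters of the word read so far
def spPieces : List Char → List Char → List (List Char)
  | [], cur => [cur.reverse]
  | c :: rest, cur => if c = ' ' then cur.reverse :: spPieces rest [] else spPieces rest (c :: cur)

theorem splitOn_go_eq_spPieces (l : List Char) : ∀ (fuel : Nat) (cur : List Char)
    (acc : List (List Char)), l.length < fuel →
    PySem.Chars.splitOn.go [' '] fuel l cur acc = acc.reverse ++ spPieces l cur := by
  induction l with
  | nil =>
    intro fuel cur acc h
    match fuel with
    | f + 1 => simp [PySem.Chars.splitOn.go, spPieces]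
  | cons c rest ih =>
    intro fuel cur acc h
    match fuel with
    | f + 1 =>
      by_cases hc : c = ' '
      · subst hc
        simp only [PySem.Chars.splitOn.go, List.isPrefixOf, BEq.rfl, Bool.true_and,
          if_pos, List.drop_succ_cons, List.drop_zero, List.length_cons, List.length_nil] at *
        rw [ih f [] (cur.reverse :: acc) (by omega)]
        simp [spPieces]
      · have hpre : ([' '].isPrefixOf (c :: rest)) = false := by
          simp [List.isPrefixOf]; exact fun h' => hc h'.symm
        simp only [PySem.Chars.splitOn.go, hpre, Bool.false_eq_true, if_false,
          List.length_cons] at *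
        rw [ih f (c :: cur) acc (by omega)]
        simp [spPieces, hc]

theorem splitOn_eq_spPieces (cs : List Char) :
    PySem.Chars.splitOn cs [' '] = spPieces cs [] := by
  show PySem.Chars.splitOn.go [' '] (cs.length + 1) cs [] [] = spPieces cs []
  rw [splitOn_go_eq_spPieces cs (cs.length + 1) [] [] (by omega)]
  rfl

theorem filter_ne_erase (v : List Char) (l : List (List Char)) :
    (l.erase v).filter (· ≠ v) = l.filter (· ≠ v) := by
  induction l with
  | nil => rfl
  | cons x xs ih =>
    by_cases hx : x = v
    · subst hx; simp [List.erase_cons_head]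
    · simp only [ne_eq, decide_not] at ih ⊢
      rw [List.erase_cons_tail (by simp [hx])]
      simp [List.filter_cons, hx, ih]

theorem removeEmptyLoop_eq_filter : ∀ (n : Nat) (l : List (List Char)),
    PySem.List.count l ([] : List Char) = n → removeEmptyLoop n l = l.filter (· ≠ ([] : List Char)) := by
  intro n
  induction n with
  | zero =>
    intro l h
    rw [PySem.List.count_eq] at h
    have hnm : ([] : List Char) ∉ l := by
      rw [← List.count_pos_iff]; omega
    simp only [removeEmptyLoop]
    rw [List.filter_eq_self.mpr]
    intro a ha
    simp only [ne_eq, decide_eq_true_eq]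
    exact fun he => hnm (he ▸ ha)
  | succ k ih =>
    intro l h
    rw [PySem.List.count_eq] at h
    have hm : ([] : List Char) ∈ l := by
      rw [← List.count_pos_iff]; omega
    simp only [removeEmptyLoop, PySem.List.remove?_eq_some_erase _ _ hm, Option.getD_some]
    rw [ih _ (by rw [PySem.List.count_eq, List.count_erase_self]; omega)]
    exact filter_ne_erase _ _

theorem join_nil_eq_flatten (ps : List (List Char)) :
    PySem.Chars.join [] ps = ps.flatten := by
  induction ps with
  | nil => rfl
  | cons a rest ih =>
    match rest with
    | [] => simp [PySem.Chars.join, List.intercalate]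
    | b :: rest' =>
      rw [PySem.Chars.join_cons_cons, ih]
      simp

def fPieces (ps : List (List Char)) : List Char :=
  ((ps.filter (· ≠ ([] : List Char))).map pyCapitalize).flatten

theorem scan_eq_fPieces (cs : List Char) :
    fPieces (spPieces cs []) = scanWords cs true ∧
    ∀ cur : List Char, cur ≠ [] →
      fPieces (spPieces cs cur) = pyCapitalize cur.reverse ++ scanWords cs false := by
  induction cs with
  | nil =>
    constructor
    · simp [spPieces, fPieces, scanWords]
    · intro cur hcur
      have : cur.reverse ≠ [] := by simpa using hcur
      simp [spPieces, fPieces, scanWords, this]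
  | cons c rest ih =>
    constructor
    · by_cases hc : c = ' '
      · subst hc
        simp [spPieces, fPieces, scanWords]
        simpa [fPieces] using ih.1
      · have := ih.2 [c] (by simp)
        simp only [spPieces, hc, if_false, scanWords, if_pos]
        rw [this]
        simp [pyCapitalize, PySem.Chars.lower]
    · intro cur hcur
      by_cases hc : c = ' '
      · subst hc
        have hrev : cur.reverse ≠ [] := by simpa using hcur
        have h1 := ih.1
        simp only [fPieces] at h1 ⊢
        simp only [spPieces, scanWords, reduceIte, List.filter_cons, ne_eq, hrev,
          not_false_eq_true, decide_true, List.map_cons, List.flatten_cons]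
        rw [h1]
      · have hstep := ih.2 (c :: cur) (by simp)
        simp only [spPieces, hc, if_false, scanWords]
        rw [hstep]
        have : (c :: cur).reverse = cur.reverse ++ [c] := by simp
        rw [this]
        match cur with
        | [] => exact absurd rfl hcur
        | x :: xs =>
          rw [show (x :: xs).reverse = xs.reverse ++ [x] by simp] at *
          match h : xs.reverse ++ [x] with
          | [] => simp at h
          | y :: ys =>
            rw [show (y :: ys) ++ [c] = y :: (ys ++ [c]) by simp]
            simp [pyCapitalize, PySem.Chars.lower]

theorem cap_hash : pyCapitalize ['#'] = ['#'] := by decide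

-- ===== VERDICT (by name: the statement is the Claim_ definition above) =====
theorem generate_hashtag_spec : Claim_equal_generate_hashtag := by
  intro s _ hpre
  unfold Spec_generate_hashtag generate_hashtag generate_hashtag_alt
  have hg : ¬(140 < PySem.Str.len s ∨ PySem.Str.len s = 0) := by
    unfold Pre_generate_hashtag at hpre
    obtain ⟨h1, h2⟩ := hpre
    push_neg
    exact ⟨by omega, by omega⟩
  rw [if_neg hg, if_neg hg]
  dsimp only
  rw [splitOn_eq_spPieces, removeEmptyLoop_eq_filter _ _ rfl,
    PySem.List.insert_zero, List.map_cons, cap_hash, join_nil_eq_flatten,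
    List.flatten_cons]
  have := (scan_eq_fPieces s.toList).1
  simp only [fPieces] at this
  rw [this]
  rfl
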